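-- pv_equiv track=rewrite | github.com/haolunc/ARC-RL | reference_solutions/solutions/6b9890af.py | transform
-- ===== SOURCE A (Python) =====
-- def transform(grid):
--
--     def bounding_box(cells):
--         rows = [r for r, _ in cells]
--         cols = [c for _, c in cells]
--         return min(rows), max(rows), min(cols), max(cols)
--
--     h = len(grid)
--     w = len(grid[0]) if h else 0
--     colour_cells = {}
--     for i in range(h):
--         for j in range(w):
--             col = grid[i][j]
--             if col != 0:
--                 colour_cells.setdefault(col, []).append((i, j))
--
--     border_colour = None
--     border_bbox = None
--     for col, cells in colour_cells.items():
--         top, bottom, left, right = bounding_box(cells)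
--         bh = bottom - top + 1
--         bw = right - left + 1
--         perimeter = 2 * (bh + bw) - 4
--         if len(cells) == perimeter:
--             border_colour = col
--             border_bbox = (top, bottom, left, right)
--             break
--
--     if border_colour is None:
--         raise ValueError("No border colour found")
--
--     inner_colour = None
--     for col in colour_cells:
--         if col != border_colour:
--             inner_colour = col
--             break
--     if inner_colour is None:
--         raise ValueError("No inner colour found")
--
--     inner_cells = colour_cells[inner_colour]
--     itop, ibottom, ileft, iright = bounding_box(inner_cells)
--     inner_h = ibottom - itop + 1
--     inner_w = iright - ileft + 1
--
--     P = [[0] * inner_w for _ in range(inner_h)]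
--     for i, j in inner_cells:
--         P[i - itop][j - ileft] = inner_colour
--
--     btop, bbottom, bleft, bright = border_bbox
--     interior_h = (bbottom - btop + 1) - 2
--     interior_w = (bright - bleft + 1) - 2
--     k = min(interior_h, interior_w) // inner_h
--     if k == 0:
--         k = 1
--     out_side = 2 + k * inner_h
--
--     O = [[0] * out_side for _ in range(out_side)]
--
--     for i in range(out_side):
--         O[0][i] = border_colour
--         O[-1][i] = border_colour
--         O[i][0] = border_colour
--         O[i][-1] = border_colour
--
--     for i in range(inner_h):
--         for j in range(inner_w):
--             val = P[i][j]
--             if val == 0: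
--                 continue
--             for di in range(k):
--                 for dj in range(k):
--                     O[1 + i * k + di][1 + j * k + dj] = val
--
--     return O
-- ===== SOURCE B (Python) =====
-- def transform(grid):
--     h = len(grid)
--     w = len(grid[0]) if h else 0
--
--     # one pass: per-colour (count, minr, maxr, minc, maxc) -- no cell lists kept
--     stats = {}
--     for i in range(h):
--         for j in range(w):
--             col = grid[i][j]
--             if col != 0:
--                 if col in stats:
--                     n, a, b, c, d = stats[col]
--                     stats[col] = (n + 1, min(a, i), max(b, i), min(c, j), max(d, j))
--                 else:
--                     stats[col] = (1, i, i, j, j)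
--
--     border_colour = None
--     border_stat = None
--     for col, s in stats.items():
--         if s[0] == 2 * ((s[2] - s[1] + 1) + (s[4] - s[3] + 1)) - 4:
--             border_colour = col
--             border_stat = s
--             break
--     if border_colour is None:
--         raise ValueError("No border colour found")
--
--     inner_colour = None
--     for col in stats:
--         if col != border_colour:
--             inner_colour = col
--             break
--     if inner_colour is None:
--         raise ValueError("No inner colour found")
--
--     _, itop, ibottom, ileft, iright = stats[inner_colour]
--     inner_h = ibottom - itop + 1
--     inner_w = iright - ileft + 1
--
--     # pattern read straight off the grid's inner bounding box
--     P = [[inner_colour if grid[i][j] == inner_colour else 0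
--           for j in range(ileft, iright + 1)]
--          for i in range(itop, ibottom + 1)]
--
--     k = min(border_stat[2] - border_stat[1] - 1,
--             border_stat[4] - border_stat[3] - 1) // inner_h
--     if k == 0:
--         k = 1
--     n = 2 + k * inner_h
--
--     # gather: every output cell computed from its coordinates
--     def cell(r, c):
--         if 1 <= r and (r - 1) // k < inner_h and 1 <= c and (c - 1) // k < inner_w \
--                 and P[(r - 1) // k][(c - 1) // k] != 0:
--             return P[(r - 1) // k][(c - 1) // k]
--         if r == 0 or r == n - 1 or c == 0 or c == n - 1:
--             return border_colour
--         return 0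
--
--     return [[cell(r, c) for c in range(n)] for r in range(n)]
-- ===== Notes on version B (the rewrite author's own statement) =====
-- stated objective: alternative
-- what changed: Replaces A's per-colour cell lists, scatter-built pattern and k-by-k block scatter into a mutable output by a single-pass per-colour stats dict (count and bounding box only), a pattern read directly off the grid's inner bounding box, and a gather that computes every output cell from its coordinates.
import Mathlib
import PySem

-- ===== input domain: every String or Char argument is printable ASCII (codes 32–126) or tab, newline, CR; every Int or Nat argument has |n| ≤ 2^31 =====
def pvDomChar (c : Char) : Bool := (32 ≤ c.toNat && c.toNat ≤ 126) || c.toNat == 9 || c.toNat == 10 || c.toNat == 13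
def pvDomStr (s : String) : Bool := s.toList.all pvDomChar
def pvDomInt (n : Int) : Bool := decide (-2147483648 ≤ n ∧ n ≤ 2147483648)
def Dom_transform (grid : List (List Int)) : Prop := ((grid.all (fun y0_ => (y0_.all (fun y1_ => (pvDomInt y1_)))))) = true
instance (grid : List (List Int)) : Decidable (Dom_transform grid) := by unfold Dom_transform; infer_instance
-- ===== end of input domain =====

-- B replaces A's per-colour cell lists, scatter-built pattern and k×k block scatter by a
-- per-colour stats dict (count + bounding box), a pattern read off the grid, and a gather
-- computing each output cell from its coordinates (objective: alternative, same cost).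
-- Equivalence is about the RETURN value; neither program mutates its argument.

-- ===== PORT A =====
-- bounding_box(cells); Python min/max raise on []: both call sites pass nonempty lists,
-- so the .getD 0 default is never read there.
def ppBBox (cells : List (Int × Int)) : Int × Int × Int × Int :=
  let rows := cells.map (fun p => p.1)
  let cols := cells.map (fun p => p.2)
  ((PySem.List.min? rows (fun x => x)).getD 0,
   (PySem.List.max? rows (fun x => x)).getD 0,
   (PySem.List.min? cols (fun x => x)).getD 0,
   (PySem.List.max? cols (fun x => x)).getD 0)

-- len(cells) == 2*((bottom-top+1)+(right-left+1)) - 4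
def ppIsBorder (cells : List (Int × Int)) : Bool :=
  PySem.List.len cells ==
    2 * (((ppBBox cells).2.1 - (ppBBox cells).1 + 1) +
         ((ppBBox cells).2.2.2 - (ppBBox cells).2.2.1 + 1)) - 4

-- the colour->cells dict scan; 'setdefault(col, []).append((i,j))' is Dict.modify col [] (· ++ [(i,j)])
def ppScan (grid : List (List Int)) (h w : Int) : PySem.Dict Int (List (Int × Int)) :=
  (PySem.List.pyRange 0 h 1).foldl (fun d i =>
    (PySem.List.pyRange 0 w 1).foldl (fun d j =>
      let col := PySem.List.pyGetD (PySem.List.pyGetD grid i []) j 0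
      if col ≠ 0 then d.modify col [] (fun cs => cs ++ [(i, j)]) else d) d)
    PySem.Dict.empty

-- O[r][c] read/write; in-range wherever A executes them inside Pre_, so the defaulting
-- forms are exact there (out of range Python raises IndexError: excluded by Pre_)
def getI (O : List (List Int)) (r c : Int) : Int :=
  PySem.List.pyGetD (PySem.List.pyGetD O r []) c 0
def setI (O : List (List Int)) (r c : Int) (v : Int) : List (List Int) :=
  PySem.List.pySetD O r (PySem.List.pySetD (PySem.List.pyGetD O r []) c v)

-- everything of Source A down to out_side; returns none where Python raises ValueError
-- (no border / no inner colour); tuple unpacking is written with projections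
def prep (grid : List (List Int)) :
    Option (Int × List (List Int) × Int × Int × Int × Int) :=
  let h := PySem.List.len grid
  let w := if h ≠ 0 then PySem.List.len (PySem.List.pyGetD grid 0 []) else 0
  let d := ppScan grid h w
  match d.items.find? (fun p => ppIsBorder p.2) with
  | none => none
  | some bp =>
    match d.keys.find? (fun c => c != bp.1) with
    | none => none
    | some ic =>
      let icells := d.getD ic []
      let ibb := ppBBox icells
      let ih := ibb.2.1 - ibb.1 + 1
      let iw := ibb.2.2.2 - ibb.2.2.1 + 1
      let P := icells.foldl (fun P q =>
          PySem.List.pySetD P (q.1 - ibb.1)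
            (PySem.List.pySetD (PySem.List.pyGetD P (q.1 - ibb.1) []) (q.2 - ibb.2.2.1) ic))
        ((PySem.List.pyRange 0 ih 1).map (fun _ => PySem.List.pyRepeat [0] iw))
      let bbb := ppBBox bp.2
      let k0 := PySem.Int.floordiv
        (min ((bbb.2.1 - bbb.1 + 1) - 2) ((bbb.2.2.2 - bbb.2.2.1 + 1) - 2)) ih
      let k := if k0 = 0 then 1 else k0
      some (bp.1, P, ih, iw, k, 2 + k * ih)

-- A's tail: zero grid, border frame (O[-1] is row/column n-1), then the k×k block scatter
def scatterA (bc : Int) (P : List (List Int)) (ih iw k n : Int) : List (List Int) :=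
  let O0 := (PySem.List.pyRange 0 n 1).map (fun _ => PySem.List.pyRepeat [0] n)
  let O1 := (PySem.List.pyRange 0 n 1).foldl (fun O i =>
      setI (setI (setI (setI O 0 i bc) (n - 1) i bc) i 0 bc) i (n - 1) bc) O0
  (PySem.List.pyRange 0 ih 1).foldl (fun O i =>
    (PySem.List.pyRange 0 iw 1).foldl (fun O j =>
      let val := getI P i j
      if val = 0 then O
      else (PySem.List.pyRange 0 k 1).foldl (fun O di =>
             (PySem.List.pyRange 0 k 1).foldl (fun O dj =>
               setI O (1 + i * k + di) (1 + j * k + dj) val) O) O) O) O1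

def transform (grid : List (List Int)) : List (List Int) :=
  match prep grid with
  | none => []   -- Python raises ValueError here (outside Pre_)
  | some (bc, P, ih, iw, k, n) => scatterA bc P ih iw k n

-- ===== PORT B =====
-- 'if col in stats: … else: stats[col] = (1,i,i,j,j)' — one dict step of Source B's stats scan
def statUpd (d : PySem.Dict Int (Int × Int × Int × Int × Int)) (col i j : Int) :
    PySem.Dict Int (Int × Int × Int × Int × Int) :=
  match d.get? col with
  | some s => d.insert col
      (s.1 + 1, min s.2.1 i, max s.2.2.1 i, min s.2.2.2.1 j, max s.2.2.2.2 j)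
  | none => d.insert col (1, i, i, j, j)

-- Source B's single stats pass: colour -> (count, minr, maxr, minc, maxc)
def statScan (grid : List (List Int)) (h w : Int) :
    PySem.Dict Int (Int × Int × Int × Int × Int) :=
  (PySem.List.pyRange 0 h 1).foldl (fun d i =>
    (PySem.List.pyRange 0 w 1).foldl (fun d j =>
      let col := PySem.List.pyGetD (PySem.List.pyGetD grid i []) j 0
      if col ≠ 0 then statUpd d col i j else d) d)
    PySem.Dict.empty

-- Source B down to n; none where Python raises ValueError.  The pattern P is read straight
-- off the grid's inner bounding box.
def prepB (grid : List (List Int)) :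
    Option (Int × List (List Int) × Int × Int × Int × Int) :=
  let h := PySem.List.len grid
  let w := if h ≠ 0 then PySem.List.len (PySem.List.pyGetD grid 0 []) else 0
  let st := statScan grid h w
  match st.items.find? (fun p => p.2.1 ==
      2 * ((p.2.2.2.1 - p.2.2.1 + 1) + (p.2.2.2.2.2 - p.2.2.2.2.1 + 1)) - 4) with
  | none => none
  | some bp =>
    match st.keys.find? (fun c => c != bp.1) with
    | none => none
    | some ic =>
      let s := st.getD ic (0, 0, 0, 0, 0)
      let ihh := s.2.2.1 - s.2.1 + 1
      let iww := s.2.2.2.2 - s.2.2.2.1 + 1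
      let P := (PySem.List.pyRange s.2.1 (s.2.2.1 + 1) 1).map (fun i =>
        (PySem.List.pyRange s.2.2.2.1 (s.2.2.2.2 + 1) 1).map (fun j =>
          if PySem.List.pyGetD (PySem.List.pyGetD grid i []) j 0 == ic then ic else 0))
      let k0 := PySem.Int.floordiv
        (min (bp.2.2.2.1 - bp.2.2.1 - 1) (bp.2.2.2.2.2 - bp.2.2.2.2.1 - 1)) ihh
      let k := if k0 = 0 then 1 else k0
      some (bp.1, P, ihh, iww, k, 2 + k * ihh)

-- def cell(r, c): the gather rule — pattern cell if (r,c) maps into a nonzero pattern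
-- cell, else border colour on the frame, else 0
def cellB (bc : Int) (P : List (List Int)) (ihh iww k n r c : Int) : Int :=
  if 1 ≤ r ∧ PySem.Int.floordiv (r - 1) k < ihh ∧ 1 ≤ c ∧
      PySem.Int.floordiv (c - 1) k < iww ∧
      PySem.List.pyGetD (PySem.List.pyGetD P (PySem.Int.floordiv (r - 1) k) [])
        (PySem.Int.floordiv (c - 1) k) 0 ≠ 0
  then PySem.List.pyGetD (PySem.List.pyGetD P (PySem.Int.floordiv (r - 1) k) [])
        (PySem.Int.floordiv (c - 1) k) 0
  else if r = 0 ∨ r = n - 1 ∨ c = 0 ∨ c = n - 1 then bc else 0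

def transform_alt (grid : List (List Int)) : List (List Int) :=
  match prepB grid with
  | none => []   -- Python raises ValueError here (outside Pre_)
  | some (bc, P, ihh, iww, k, n) =>
    (PySem.List.pyRange 0 n 1).map (fun r =>
      (PySem.List.pyRange 0 n 1).map (fun c => cellB bc P ihh iww k n r c))

-- ===== PRECONDITION & SPEC =====
-- Spec-side (closed-form) description of the scanned data: the nonzero cells in scan
-- order, the distinct colours in first-occurrence order, the cells of one colour,
-- bounding boxes, and the derived sizes.  Independent of both ports.
def sCellList (grid : List (List Int)) : List (Int × Int × Int) :=
  (List.range grid.length).flatMap (fun i =>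
    (List.range (grid.headD []).length).flatMap (fun j =>
      if (grid.getD i []).getD j 0 ≠ 0
      then [((grid.getD i []).getD j 0, ((i : Int), (j : Int)))] else []))

def sColours (grid : List (List Int)) : List Int :=
  PySem.Set.ofList ((sCellList grid).map (fun p => p.1))

def sCellsOf (grid : List (List Int)) (c : Int) : List (Int × Int) :=
  (sCellList grid).filterMap (fun p => if p.1 = c then some p.2 else none)

def sBBox (cells : List (Int × Int)) : Int × Int × Int × Int :=
  match cells with
  | [] => (0, 0, 0, 0)
  | q :: qs =>
    (qs.foldl (fun a p => min a p.1) q.1, qs.foldl (fun a p => max a p.1) q.1,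
     qs.foldl (fun a p => min a p.2) q.2, qs.foldl (fun a p => max a p.2) q.2)

def sIsBorder (cells : List (Int × Int)) : Bool :=
  ((cells.length : Int)) ==
    2 * (((sBBox cells).2.1 - (sBBox cells).1 + 1) +
         ((sBBox cells).2.2.2 - (sBBox cells).2.2.1 + 1)) - 4

def sBorder (grid : List (List Int)) : Option Int :=
  (sColours grid).find? (fun c => sIsBorder (sCellsOf grid c))

-- (bc, ih, iw, k): border colour, inner pattern height/width, scale
def sParams (grid : List (List Int)) : Option (Int × Int × Int × Int) :=
  match sBorder grid with
  | none => none
  | some bc =>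
    match (sColours grid).find? (fun c => c != bc) with
    | none => none
    | some ic =>
      let ib := sBBox (sCellsOf grid ic)
      let bb := sBBox (sCellsOf grid bc)
      let ih := ib.2.1 - ib.1 + 1
      let iw := ib.2.2.2 - ib.2.2.1 + 1
      let k0 := PySem.Int.floordiv
        (min ((bb.2.1 - bb.1 + 1) - 2) ((bb.2.2.2 - bb.2.2.1 + 1) - 2)) ih
      some (bc, ih, iw, if k0 = 0 then 1 else k0)

def sIH (grid : List (List Int)) : Int := match sParams grid with | some q => q.2.1 | none => 0
def sIW (grid : List (List Int)) : Int := match sParams grid with | some q => q.2.2.1 | none => 0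
def sK (grid : List (List Int)) : Int := match sParams grid with | some q => q.2.2.2 | none => 0

-- every row long enough for the scan (a shorter row: IndexError in both Pythons)
def rowsOK (grid : List (List Int)) : Prop :=
  ∀ row ∈ grid, (grid.headD []).length ≤ row.length

-- Pre_ excludes exactly the grids on which A raises: a row shorter than row 0
-- (IndexError), no border-perimeter colour or a single colour (ValueError), and scale
-- overflow (positive k with k*(iw-ih) ≥ 2), where A's block scatter writes past the
-- output row (IndexError; with k ≤ -1 the scatter loops are empty and A returns).
def Pre_transform (grid : List (List Int)) : Prop :=
  rowsOK grid ∧ sParams grid ≠ none ∧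
    (sK grid ≤ -1 ∨ sK grid * (sIW grid - sIH grid) ≤ 1)
instance (grid : List (List Int)) : Decidable (Pre_transform grid) := by
  unfold Pre_transform rowsOK; infer_instance

def pvWitness_transform : List (List Int) := [[1,1,1],[1,0,1],[1,1,1],[2,0,0]]

def Spec_transform (grid : List (List Int)) (out : List (List Int)) : Prop :=
  out = transform_alt grid
instance (grid : List (List Int)) (out : List (List Int)) : Decidable (Spec_transform grid out) := by
  unfold Spec_transform; infer_instance

-- ===== CLAIM (what is proved, stated in full; the proofs are below) =====
def Claim_equal_transform : Prop := ∀ (grid : List (List Int)),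
  Dom_transform grid → Pre_transform grid → Spec_transform grid (transform grid)

-- ===== LEMMAS AND PROOFS =====


-- generic small helpers used by the proofs
theorem find?_congr_mem {α : Type} (l : List α) (p q : α → Bool)
    (h : ∀ a ∈ l, p a = q a) : l.find? p = l.find? q := by
  induction l with
  | nil => rfl
  | cons a t ih =>
    rw [List.find?_cons, List.find?_cons, h a (by simp)]
    cases q a
    · exact ih (fun x hx => h x (by simp [hx]))
    · rfl

theorem foldl_id {α β : Type} (l : List α) (b : β) : l.foldl (fun b _ => b) b = b := by
  induction l <;> simp_all

-- Nat-indexed view of grid reads/writes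
def gN (O : List (List Int)) (r c : Nat) : Int := (O.getD r []).getD c 0
def setN (O : List (List Int)) (r c : Nat) (v : Int) : List (List Int) :=
  O.set r ((O.getD r []).set c v)

theorem getI_natCast (O : List (List Int)) (r c : Nat) :
    getI O (r : Int) (c : Int) = gN O r c := by
  simp [getI, gN]

theorem setI_natCast (O : List (List Int)) (r c : Nat) (v : Int) :
    setI O (r : Int) (c : Int) v = setN O r c v := by
  simp [setI, setN]

theorem length_setN (O : List (List Int)) (r c : Nat) (v : Int) :
    (setN O r c v).length = O.length := by
  simp [setN]

theorem row_setN (O : List (List Int)) (r c : Nat) (v : Int) (r' : Nat) :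
    (setN O r c v).getD r' [] = if r' = r ∧ r < O.length
      then (O.getD r []).set c v else O.getD r' [] := by
  unfold setN
  by_cases hl : r < O.length
  · by_cases he : r' = r
    · subst he
      simp [List.getD, hl]
    · simp [List.getD, List.getElem?_set_ne (fun h => he h.symm), he]
  · rw [List.set_eq_of_length_le (by omega)]
    simp [hl]

theorem rowlen_setN (O : List (List Int)) (r c : Nat) (v : Int) (r' : Nat) :
    ((setN O r c v).getD r' []).length = (O.getD r' []).length := by
  rw [row_setN]
  split
  · rename_i h; rw [h.1]; simp
  · rfl

theorem gN_setN_ne (O : List (List Int)) (r c : Nat) (v : Int) (r' c' : Nat)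
    (h : ¬(r' = r ∧ c' = c)) : gN (setN O r c v) r' c' = gN O r' c' := by
  unfold gN
  rw [row_setN]
  split
  · rename_i hr
    have hc : c' ≠ c := fun hc => h ⟨hr.1, hc⟩
    rw [hr.1]
    simp [List.getD, List.getElem?_set_ne (fun hh => hc hh.symm)]
  · rfl

theorem gN_setN_self (O : List (List Int)) (r c : Nat) (v : Int)
    (hr : r < O.length) (hc : c < (O.getD r []).length) :
    gN (setN O r c v) r c = v := by
  unfold gN
  rw [row_setN, if_pos ⟨rfl, hr⟩]
  simp only [List.getD] at hc ⊢
  simp [hc]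

-- a straight-line list of writes O[r][c] = v
def applyW (O : List (List Int)) (ws : List (Nat × Nat × Int)) : List (List Int) :=
  ws.foldl (fun O w => setN O w.1 w.2.1 w.2.2) O

theorem applyW_cons (O : List (List Int)) (w : Nat × Nat × Int) (ws : List (Nat × Nat × Int)) :
    applyW O (w :: ws) = applyW (setN O w.1 w.2.1 w.2.2) ws := rfl

theorem length_applyW (O : List (List Int)) (ws : List (Nat × Nat × Int)) :
    (applyW O ws).length = O.length := by
  induction ws generalizing O with
  | nil => rfl
  | cons w ws ih => rw [applyW_cons, ih, length_setN]

theorem rowlen_applyW (O : List (List Int)) (ws : List (Nat × Nat × Int)) (r : Nat) :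
    ((applyW O ws).getD r []).length = (O.getD r []).length := by
  induction ws generalizing O with
  | nil => rfl
  | cons w ws ih => rw [applyW_cons, ih, rowlen_setN]

theorem gN_applyW_not_mem (O : List (List Int)) (ws : List (Nat × Nat × Int)) (r c : Nat)
    (h : ∀ w ∈ ws, ¬(w.1 = r ∧ w.2.1 = c)) : gN (applyW O ws) r c = gN O r c := by
  induction ws generalizing O with
  | nil => rfl
  | cons w ws ih =>
    rw [applyW_cons, ih _ (fun w hw => h w (List.mem_cons_of_mem _ hw)),
      gN_setN_ne]
    intro hh
    exact h w List.mem_cons_self ⟨hh.1.symm, hh.2.symm⟩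

theorem gN_applyW_mem (O : List (List Int)) (ws : List (Nat × Nat × Int)) (r c : Nat) (v : Int)
    (hmem : (r, c, v) ∈ ws) (hval : ∀ w ∈ ws, w.1 = r → w.2.1 = c → w.2.2 = v)
    (hr : r < O.length) (hc : c < (O.getD r []).length) :
    gN (applyW O ws) r c = v := by
  induction ws generalizing O with
  | nil => cases hmem
  | cons w ws ih =>
    rw [applyW_cons]
    by_cases hmem' : (r, c, v) ∈ ws
    · exact ih _ hmem' (fun w hw => hval w (List.mem_cons_of_mem _ hw))
        (by rw [length_setN]; exact hr) (by rw [rowlen_setN]; exact hc)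
    · have hw : w = (r, c, v) := by
        rcases List.mem_cons.1 hmem with h | h
        · exact h.symm
        · exact absurd h hmem'
      subst hw
      by_cases hrest : ∃ w ∈ ws, w.1 = r ∧ w.2.1 = c
      · obtain ⟨w', hw', h1, h2⟩ := hrest
        have : w' = (r, c, v) := by
          have := hval w' (List.mem_cons_of_mem _ hw') h1 h2
          obtain ⟨a, b, u⟩ := w'
          simp_all
        exact absurd (this ▸ hw') hmem'
      · push_neg at hrest
        rw [gN_applyW_not_mem _ _ _ _ (by
            intro w hw hh
            exact (hrest w hw hh.1).elim hh.2)]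
        exact gN_setN_self O r c v hr hc

-- the writes of A's border loop, in execution order
def bws (n : Nat) (bc : Int) : List (Nat × Nat × Int) :=
  (List.range n).flatMap (fun i => [(0, i, bc), (n - 1, i, bc), (i, 0, bc), (i, n - 1, bc)])

theorem bws_val (n : Nat) (bc : Int) : ∀ w ∈ bws n bc, w.2.2 = bc := by
  intro w hw
  simp only [bws, List.mem_flatMap, List.mem_range] at hw
  obtain ⟨i, _, hw⟩ := hw
  simp only [List.mem_cons, List.mem_singleton] at hw
  rcases hw with h | h | h | h | h <;> first | (subst h; rfl) | cases h

theorem gN_border (n : Nat) (bc : Int) (r c : Nat) (hr : r < n) (hc : c < n) :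
    gN (applyW (List.replicate n (List.replicate n (0:Int))) (bws n bc)) r c
      = if r = 0 ∨ r = n - 1 ∨ c = 0 ∨ c = n - 1 then bc else 0 := by
  have hzero : gN (List.replicate n (List.replicate n (0:Int))) r c = 0 := by
    simp [gN, List.getD, List.getElem?_replicate, hr, hc]
  have hrow : ((List.replicate n (List.replicate n (0:Int))).getD r []).length = n := by
    simp [List.getD, List.getElem?_replicate, hr]
  by_cases hframe : r = 0 ∨ r = n - 1 ∨ c = 0 ∨ c = n - 1
  · rw [if_pos hframe]
    have hmem : (r, c, bc) ∈ bws n bc := by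
      simp only [bws, List.mem_flatMap, List.mem_range]
      rcases hframe with h | h | h | h
      · exact ⟨c, hc, by simp [h]⟩
      · exact ⟨c, hc, by simp [h]⟩
      · exact ⟨r, hr, by simp [h]⟩
      · exact ⟨r, hr, by simp [h]⟩
    exact gN_applyW_mem _ _ _ _ _ hmem
      (fun w hw _ _ => bws_val n bc w hw) (by simp [hr]) (by rw [hrow]; exact hc)
  · rw [if_neg hframe]
    push_neg at hframe
    rw [gN_applyW_not_mem, hzero]
    intro w hw hwc
    simp only [bws, List.mem_flatMap, List.mem_range] at hw
    obtain ⟨i, _, hw⟩ := hw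
    simp only [List.mem_cons, List.mem_singleton] at hw
    obtain ⟨h1, h2, h3, h4⟩ := hframe
    rcases hw with h | h | h | h | h <;>
      first
      | (subst h; simp only [] at hwc; omega)
      | cases h

-- the writes of A's scatter loop, in execution order
def sws (P : List (List Int)) (ihn iwn kn : Nat) : List (Nat × Nat × Int) :=
  (List.range ihn).flatMap (fun i => (List.range iwn).flatMap (fun j =>
    if gN P i j = 0 then []
    else (List.range kn).flatMap (fun di => (List.range kn).map (fun dj =>
      (1 + i * kn + di, 1 + j * kn + dj, gN P i j)))))

theorem mem_sws (P : List (List Int)) (ihn iwn kn : Nat) (w : Nat × Nat × Int) :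
    w ∈ sws P ihn iwn kn ↔ ∃ i, i < ihn ∧ ∃ j, j < iwn ∧ ∃ di, di < kn ∧ ∃ dj, dj < kn ∧
      gN P i j ≠ 0 ∧ w = (1 + i * kn + di, 1 + j * kn + dj, gN P i j) := by
  simp only [sws, List.mem_flatMap, List.mem_range, List.mem_map]
  constructor
  · rintro ⟨i, hi, j, hj, hw⟩
    rw [List.mem_ite_nil_left] at hw
    obtain ⟨hnz, hw⟩ := hw
    simp only [List.mem_flatMap, List.mem_range, List.mem_map] at hw
    obtain ⟨di, hdi, dj, hdj, hw⟩ := hw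
    exact ⟨i, hi, j, hj, di, hdi, dj, hdj, hnz, hw.symm⟩
  · rintro ⟨i, hi, j, hj, di, hdi, dj, hdj, hnz, hw⟩
    refine ⟨i, hi, j, hj, ?_⟩
    rw [List.mem_ite_nil_left]
    refine ⟨hnz, ?_⟩
    simp only [List.mem_flatMap, List.mem_range, List.mem_map]
    exact ⟨di, hdi, dj, hdj, hw.symm⟩

theorem div_of_block (kn i d : Nat) (hk : 1 ≤ kn) (hd : d < kn) :
    (i * kn + d) / kn = i := by
  rw [Nat.add_comm, Nat.add_mul_div_right _ _ (by omega : 0 < kn), Nat.div_eq_of_lt hd,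
    Nat.zero_add]

theorem gN_scatter (P : List (List Int)) (ihn iwn kn : Nat)
    (hih : 1 ≤ ihn) (hk : 1 ≤ kn) (hle : kn * iwn ≤ kn * ihn + 1)
    (O1 : List (List Int)) (hlen : O1.length = 2 + kn * ihn)
    (hrow : ∀ r, r < 2 + kn * ihn → (O1.getD r []).length = 2 + kn * ihn)
    (r c : Nat) :
    gN (applyW O1 (sws P ihn iwn kn)) r c =
      if 1 ≤ r ∧ r ≤ kn * ihn ∧ 1 ≤ c ∧ c ≤ kn * iwn ∧
          gN P ((r - 1) / kn) ((c - 1) / kn) ≠ 0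
      then gN P ((r - 1) / kn) ((c - 1) / kn)
      else gN O1 r c := by
  have hkpos : 0 < kn := hk
  by_cases hin : 1 ≤ r ∧ r ≤ kn * ihn ∧ 1 ≤ c ∧ c ≤ kn * iwn ∧
      gN P ((r - 1) / kn) ((c - 1) / kn) ≠ 0
  · obtain ⟨h1, h2, h3, h4, h6⟩ := hin
    rw [if_pos ⟨h1, h2, h3, h4, h6⟩]
    have hprlt : (r - 1) / kn < ihn := by
      rw [Nat.div_lt_iff_lt_mul hkpos]
      have hcomm : ihn * kn = kn * ihn := Nat.mul_comm _ _
      omega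
    have hpclt : (c - 1) / kn < iwn := by
      rw [Nat.div_lt_iff_lt_mul hkpos]
      have hcomm : iwn * kn = kn * iwn := Nat.mul_comm _ _
      omega
    have hdmr : kn * ((r - 1) / kn) + (r - 1) % kn = r - 1 := Nat.div_add_mod _ _
    have hdmc : kn * ((c - 1) / kn) + (c - 1) % kn = c - 1 := Nat.div_add_mod _ _
    have hmr : (r - 1) % kn < kn := Nat.mod_lt _ hkpos
    have hmc : (c - 1) % kn < kn := Nat.mod_lt _ hkpos
    have hcommr : ((r - 1) / kn) * kn = kn * ((r - 1) / kn) := Nat.mul_comm _ _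
    have hcommc : ((c - 1) / kn) * kn = kn * ((c - 1) / kn) := Nat.mul_comm _ _
    apply gN_applyW_mem
    · rw [mem_sws]
      exact ⟨(r - 1) / kn, hprlt, (c - 1) / kn, hpclt, (r - 1) % kn, hmr, (c - 1) % kn, hmc,
        h6, by simp only [Prod.mk.injEq, and_true]; exact ⟨by omega, by omega⟩⟩
    · intro w hw hw1 hw2
      rw [mem_sws] at hw
      obtain ⟨i, hi, j, hj, di, hdi, dj, hdj, hnz, hw⟩ := hw
      subst hw
      simp only at hw1 hw2
      have hieq : i = (r - 1) / kn := by
        have : r - 1 = i * kn + di := by omega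
        rw [this, div_of_block kn i di hk hdi]
      have hjeq : j = (c - 1) / kn := by
        have : c - 1 = j * kn + dj := by omega
        rw [this, div_of_block kn j dj hk hdj]
      simp only [hieq, hjeq]
    · omega
    · rw [hrow r (by omega)]; omega
  · rw [if_neg hin]
    apply gN_applyW_not_mem
    intro w hw hwc
    rw [mem_sws] at hw
    obtain ⟨i, hi, j, hj, di, hdi, dj, hdj, hnz, hw⟩ := hw
    subst hw
    obtain ⟨hw1, hw2⟩ := hwc
    simp only at hw1 hw2
    have hri : i * kn + kn ≤ ihn * kn := by
      have := Nat.mul_le_mul_right kn (Nat.succ_le_of_lt hi)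
      calc i * kn + kn = (i + 1) * kn := by ring
        _ ≤ ihn * kn := this
    have hcj : j * kn + kn ≤ iwn * kn := by
      have := Nat.mul_le_mul_right kn (Nat.succ_le_of_lt hj)
      calc j * kn + kn = (j + 1) * kn := by ring
        _ ≤ iwn * kn := this
    have hieq : i = (r - 1) / kn := by
      have : r - 1 = i * kn + di := by omega
      rw [this, div_of_block kn i di hk hdi]
    have hjeq : j = (c - 1) / kn := by
      have : c - 1 = j * kn + dj := by omega
      rw [this, div_of_block kn j dj hk hdj]
    apply hin
    have hcomm : ihn * kn = kn * ihn := Nat.mul_comm _ _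
    have hcomm' : iwn * kn = kn * iwn := Nat.mul_comm _ _
    refine ⟨by omega, by omega, by omega, by omega, ?_⟩
    rw [← hieq, ← hjeq]
    exact hnz

theorem getElem_gN (L : List (List Int)) (r c : Nat) (hr : r < L.length)
    (hc : c < (L[r]).length) : (L[r])[c] = gN L r c := by
  simp [gN, List.getD, hr, hc]

theorem getElem_row (L : List (List Int)) (r : Nat) (hr : r < L.length) :
    L[r] = L.getD r [] := by
  simp [List.getD, hr]

theorem scatterA_eq (bc : Int) (P : List (List Int)) (ihn iwn kn n : Nat)
    (hn : n = 2 + kn * ihn) (hk : 1 ≤ kn) (hih : 1 ≤ ihn) :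
    scatterA bc P (ihn : Int) (iwn : Int) (kn : Int) (n : Int) =
      applyW (applyW (List.replicate n (List.replicate n (0:Int))) (bws n bc))
        (sws P ihn iwn kn) := by
  have hkh : 1 ≤ kn * ihn := Nat.mul_pos hk hih
  have hn3 : 3 ≤ n := by omega
  unfold scatterA
  dsimp only
  have hO0 : ((PySem.List.pyRange 0 (n : Int) 1).map
      (fun _ => PySem.List.pyRepeat [(0:Int)] (n : Int)))
      = List.replicate n (List.replicate n (0:Int)) := by
    rw [PySem.List.pyRange_zero_nat]
    simp [List.map_map, PySem.List.pyRepeat_singleton, Function.comp_def, List.map_const']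
  rw [hO0]
  have hB : ∀ O0 : List (List Int),
      ((PySem.List.pyRange 0 (n : Int) 1).foldl (fun O i =>
        setI (setI (setI (setI O 0 i bc) ((n : Int) - 1) i bc) i 0 bc) i ((n : Int) - 1) bc) O0)
      = applyW O0 (bws n bc) := by
    intro O0
    rw [PySem.List.pyRange_zero_nat, List.foldl_map, applyW, bws, List.foldl_flatMap]
    apply PySem.List.foldl_congr_mem
    intro O i hi
    rw [List.mem_range] at hi
    have e1 : ((n : Int) - 1) = (((n - 1 : Nat)) : Int) := by omega
    rw [e1]
    show setI (setI (setI (setI O (((0:Nat)) : Int) (i : Int) bc) (((n - 1 : Nat)) : Int) (i : Int) bc)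
        (i : Int) (((0:Nat)) : Int) bc) (i : Int) (((n - 1 : Nat)) : Int) bc = _
    rw [setI_natCast, setI_natCast, setI_natCast, setI_natCast]
    simp [List.foldl]
  rw [hB]
  have hS : ∀ O1 : List (List Int),
      ((PySem.List.pyRange 0 (ihn : Int) 1).foldl (fun O i =>
        (PySem.List.pyRange 0 (iwn : Int) 1).foldl (fun O j =>
          if getI P i j = 0 then O
          else (PySem.List.pyRange 0 (kn : Int) 1).foldl (fun O di =>
                 (PySem.List.pyRange 0 (kn : Int) 1).foldl (fun O dj =>
                   setI O (1 + i * (kn : Int) + di) (1 + j * (kn : Int) + dj) (getI P i j)) O) O) O) O1)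
      = applyW O1 (sws P ihn iwn kn) := by
    intro O1
    rw [applyW, sws, List.foldl_flatMap]
    rw [PySem.List.pyRange_zero_nat (n := ihn), List.foldl_map]
    apply PySem.List.foldl_congr_mem
    intro O i hi
    rw [List.mem_range] at hi
    rw [List.foldl_flatMap]
    rw [PySem.List.pyRange_zero_nat (n := iwn), List.foldl_map]
    apply PySem.List.foldl_congr_mem
    intro O' j hj
    rw [List.mem_range] at hj
    simp only [getI_natCast]
    by_cases hz : gN P i j = 0
    · simp [hz]
    · rw [if_neg hz, if_neg hz, List.foldl_flatMap]
      rw [PySem.List.pyRange_zero_nat (n := kn), List.foldl_map]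
      apply PySem.List.foldl_congr_mem
      intro O'' di hdi
      rw [List.mem_range] at hdi
      rw [List.foldl_map]
      rw [List.foldl_map]
      apply PySem.List.foldl_congr_mem
      intro O3 dj hdj
      rw [List.mem_range] at hdj
      have e1 : (1 + (i : Int) * (kn : Int) + (di : Int)) = (((1 + i * kn + di : Nat)) : Int) := by
        push_cast; ring
      have e2 : (1 + (j : Int) * (kn : Int) + (dj : Int)) = (((1 + j * kn + dj : Nat)) : Int) := by
        push_cast; ring
      rw [e1, e2, setI_natCast]
  rw [hS]


-- B's cell rule at Nat coordinates, phrased as A's scatter condition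
theorem cellB_eq (bc : Int) (P : List (List Int)) (ihn iwn kn nN : Nat)
    (hk : 1 ≤ kn) (hih : 1 ≤ ihn) (hn : nN = 2 + kn * ihn) (r c : Nat) :
    cellB bc P (ihn : Int) (iwn : Int) (kn : Int) (nN : Int) (r : Int) (c : Int) =
      (if 1 ≤ r ∧ r ≤ kn * ihn ∧ 1 ≤ c ∧ c ≤ kn * iwn ∧
          gN P ((r - 1) / kn) ((c - 1) / kn) ≠ 0
       then gN P ((r - 1) / kn) ((c - 1) / kn)
       else if r = 0 ∨ r = nN - 1 ∨ c = 0 ∨ c = nN - 1 then bc else 0) := by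
  have hframe : ((r : Int) = 0 ∨ (r : Int) = (nN : Int) - 1 ∨ (c : Int) = 0 ∨
      (c : Int) = (nN : Int) - 1) ↔ (r = 0 ∨ r = nN - 1 ∨ c = 0 ∨ c = nN - 1) := by
    have hn2 : 2 ≤ nN := by have := Nat.mul_pos hk hih; omega
    omega
  unfold cellB
  by_cases hr1 : 1 ≤ r
  · by_cases hc1 : 1 ≤ c
    · have hdr : ((r - 1) / kn < ihn) ↔ r ≤ kn * ihn := by
        rw [Nat.div_lt_iff_lt_mul hk]
        have := Nat.mul_comm ihn kn
        omega
      have hdc : ((c - 1) / kn < iwn) ↔ c ≤ kn * iwn := by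
        rw [Nat.div_lt_iff_lt_mul hk]
        have := Nat.mul_comm iwn kn
        omega
      have er : ((r : Int) - 1) = (↑(r - 1) : Int) := by omega
      have ec : ((c : Int) - 1) = (↑(c - 1) : Int) := by omega
      rw [er, ec, PySem.Int.floordiv_natCast, PySem.Int.floordiv_natCast]
      generalize hg1 : (r - 1) / kn = dr at hdr ⊢
      generalize hg2 : (c - 1) / kn = dc at hdc ⊢
      have hg : PySem.List.pyGetD (PySem.List.pyGetD P (dr : Int) []) (dc : Int) 0
          = gN P dr dc := by
        simp [gN]
      rw [hg]
      have hcond : (1 ≤ (r : Int) ∧ (dr : Int) < (ihn : Int) ∧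
          1 ≤ (c : Int) ∧ (dc : Int) < (iwn : Int) ∧ gN P dr dc ≠ 0) ↔
          (1 ≤ r ∧ r ≤ kn * ihn ∧ 1 ≤ c ∧ c ≤ kn * iwn ∧ gN P dr dc ≠ 0) := by
        constructor
        · rintro ⟨h1, h2, h3, h4, h5⟩
          rw [Nat.cast_lt] at h2 h4
          exact ⟨hr1, hdr.1 h2, hc1, hdc.1 h4, h5⟩
        · rintro ⟨h1, h2, h3, h4, h5⟩
          refine ⟨by omega, ?_, by omega, ?_, h5⟩
          · rw [Nat.cast_lt]; exact hdr.2 h2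
          · rw [Nat.cast_lt]; exact hdc.2 h4
      rw [if_congr hcond rfl (if_congr hframe rfl rfl)]
    · have hcI : ¬ (1 ≤ (c : Int)) := by omega
      have hA : ¬ (1 ≤ (r : Int) ∧ PySem.Int.floordiv ((r : Int) - 1) (kn : Int) < (ihn : Int) ∧
          1 ≤ (c : Int) ∧ PySem.Int.floordiv ((c : Int) - 1) (kn : Int) < (iwn : Int) ∧
          PySem.List.pyGetD (PySem.List.pyGetD P (PySem.Int.floordiv ((r : Int) - 1) (kn : Int)) [])
            (PySem.Int.floordiv ((c : Int) - 1) (kn : Int)) 0 ≠ 0) := fun h => hcI h.2.2.1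
      have hB : ¬ (1 ≤ r ∧ r ≤ kn * ihn ∧ 1 ≤ c ∧ c ≤ kn * iwn ∧
          gN P ((r - 1) / kn) ((c - 1) / kn) ≠ 0) := fun h => hc1 h.2.2.1
      rw [if_neg hA, if_neg hB, if_congr hframe rfl rfl]
  · have hrI : ¬ (1 ≤ (r : Int)) := by omega
    have hA : ¬ (1 ≤ (r : Int) ∧ PySem.Int.floordiv ((r : Int) - 1) (kn : Int) < (ihn : Int) ∧
        1 ≤ (c : Int) ∧ PySem.Int.floordiv ((c : Int) - 1) (kn : Int) < (iwn : Int) ∧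
        PySem.List.pyGetD (PySem.List.pyGetD P (PySem.Int.floordiv ((r : Int) - 1) (kn : Int)) [])
          (PySem.Int.floordiv ((c : Int) - 1) (kn : Int)) 0 ≠ 0) := fun h => hrI h.1
    have hB : ¬ (1 ≤ r ∧ r ≤ kn * ihn ∧ 1 ≤ c ∧ c ≤ kn * iwn ∧
        gN P ((r - 1) / kn) ((c - 1) / kn) ≠ 0) := fun h => hr1 h.1
    rw [if_neg hA, if_neg hB, if_congr hframe rfl rfl]

-- the whole tail, normal case: A's frame + scatter = B's gather, cell by cell
theorem tail_eq (bc : Int) (P : List (List Int)) (ihn iwn kn : Nat)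
    (hih : 1 ≤ ihn) (hk : 1 ≤ kn) (hle : kn * iwn ≤ kn * ihn + 1) :
    scatterA bc P (ihn : Int) (iwn : Int) (kn : Int) (((2 + kn * ihn : Nat)) : Int) =
      (PySem.List.pyRange 0 (((2 + kn * ihn : Nat)) : Int) 1).map (fun r =>
        (PySem.List.pyRange 0 (((2 + kn * ihn : Nat)) : Int) 1).map (fun c =>
          cellB bc P (ihn : Int) (iwn : Int) (kn : Int) (((2 + kn * ihn : Nat)) : Int) r c)) := by
  have hn3 : 3 ≤ 2 + kn * ihn := by have := Nat.mul_pos hk hih; omega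
  rw [scatterA_eq bc P ihn iwn kn _ rfl hk hih]
  set nN := 2 + kn * ihn with hn
  set O1 := applyW (List.replicate nN (List.replicate nN (0:Int))) (bws nN bc) with hO1
  set L := applyW O1 (sws P ihn iwn kn) with hL
  have hlen1 : O1.length = nN := by rw [hO1, length_applyW, List.length_replicate]
  have hrow1 : ∀ r, r < nN → (O1.getD r []).length = nN := by
    intro r hr
    rw [hO1, rowlen_applyW]
    simp [List.getD, List.getElem?_replicate, hr]
  have hlenL : L.length = nN := by rw [hL, length_applyW, hlen1]
  have hrowL : ∀ r, r < nN → (L.getD r []).length = nN := by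
    intro r hr
    rw [hL, rowlen_applyW]
    exact hrow1 r hr
  have hgL : ∀ r c : Nat, r < nN → c < nN → gN L r c =
      if 1 ≤ r ∧ r ≤ kn * ihn ∧ 1 ≤ c ∧ c ≤ kn * iwn ∧
          gN P ((r - 1) / kn) ((c - 1) / kn) ≠ 0
      then gN P ((r - 1) / kn) ((c - 1) / kn)
      else if r = 0 ∨ r = nN - 1 ∨ c = 0 ∨ c = nN - 1 then bc else 0 := by
    intro r c hr hc
    rw [hL, gN_scatter P ihn iwn kn hih hk hle O1 (by omega)
      (fun r hr => hrow1 r (by omega)) r c]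
    rw [hO1, gN_border nN bc r c hr hc]
  simp only [PySem.List.pyRange_zero_nat (n := nN), List.map_map, Function.comp_def]
  apply List.ext_getElem
  · simp [hlenL]
  intro r h1 h2
  rw [hlenL] at h1
  rw [List.getElem_map, List.getElem_range]
  apply List.ext_getElem
  · rw [getElem_row _ _ (by omega), hrowL r h1]
    simp
  intro c hc1 hc2
  have hcN : c < nN := by
    rw [getElem_row _ _ (by omega), hrowL r h1] at hc1
    exact hc1
  rw [getElem_gN L r c (by omega) (by rw [getElem_row _ _ (by omega)] at hc1 ⊢; exact hc1),
    hgL r c h1 hcN]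
  rw [List.getElem_map, List.getElem_range, cellB_eq bc P ihn iwn kn nN hk hih hn r c]

-- the degenerate scale (k ≤ -1, so out_side ≤ 1): both tails collapse
theorem tail_eq_deg (bc : Int) (P : List (List Int)) (ih iw k : Int)
    (hk : k ≤ -1) (hih : 1 ≤ ih) :
    scatterA bc P ih iw k (2 + k * ih) =
      (PySem.List.pyRange 0 (2 + k * ih) 1).map (fun r =>
        (PySem.List.pyRange 0 (2 + k * ih) 1).map (fun c =>
          cellB bc P ih iw k (2 + k * ih) r c)) := by
  have hkih : k * ih ≤ -ih := by
    have h1 := mul_le_mul_of_nonneg_right hk (show (0:Int) ≤ ih by omega)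
    simpa using h1
  have hkr : PySem.List.pyRange 0 k 1 = [] := by
    rw [PySem.List.pyRange_one]
    have h0 : (k - 0).toNat = 0 := by omega
    rw [h0]
    rfl
  have hinner : ∀ (i : Int) (O : List (List Int)),
      ((PySem.List.pyRange 0 iw 1).foldl (fun O j =>
        if getI P i j = 0 then O
        else (PySem.List.pyRange 0 k 1).foldl (fun O di =>
               (PySem.List.pyRange 0 k 1).foldl (fun O dj =>
                 setI O (1 + i * k + di) (1 + j * k + dj) (getI P i j)) O) O) O) = O := by
    intro i O
    rw [PySem.List.foldl_congr_mem _ _ (fun O _ => O) O (by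
      intro acc j _
      rw [hkr]
      simp)]
    exact foldl_id _ _
  have hscat : ∀ O : List (List Int),
      ((PySem.List.pyRange 0 ih 1).foldl (fun O i =>
        (PySem.List.pyRange 0 iw 1).foldl (fun O j =>
          if getI P i j = 0 then O
          else (PySem.List.pyRange 0 k 1).foldl (fun O di =>
                 (PySem.List.pyRange 0 k 1).foldl (fun O dj =>
                   setI O (1 + i * k + di) (1 + j * k + dj) (getI P i j)) O) O) O) O) = O := by
    intro O
    rw [PySem.List.foldl_congr_mem _ _ (fun O _ => O) O (fun acc i _ => hinner i acc)]
    exact foldl_id _ _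
  unfold scatterA
  dsimp only
  rw [hscat]
  have hcase : 2 + k * ih ≤ 0 ∨ 2 + k * ih = 1 := by
    set m := k * ih with hm
    omega
  rcases hcase with hn | hn
  · have hr0 : PySem.List.pyRange 0 (2 + k * ih) 1 = [] := by
      rw [PySem.List.pyRange_one]
      have h0 : (2 + k * ih - 0).toNat = 0 := by omega
      rw [h0]
      rfl
    rw [hr0]
    simp
  · have hih1 : ih = 1 := by
      set m := k * ih with hm
      omega
    have hk1 : k = -1 := by
      rw [hih1, mul_one] at hn
      omega
    subst hih1
    subst hk1
    have e1 : (2 + (-1 : Int) * 1) = 1 := by norm_num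
    rw [e1]
    have hr1 : PySem.List.pyRange 0 (1 : Int) 1 = [0] := by decide
    have hrep : PySem.List.pyRepeat [(0:Int)] 1 = [0] := by decide
    rw [hr1]
    simp only [List.map_cons, List.map_nil, List.foldl_cons, List.foldl_nil, hrep]
    have e0 : (1 : Int) - 1 = 0 := by norm_num
    rw [e0]
    have hset : ∀ (x v : Int), setI [[x]] 0 0 v = [[v]] := by
      intro x v
      show setI [[x]] (((0:Nat)) : Int) (((0:Nat)) : Int) v = [[v]]
      rw [setI_natCast]
      simp [setN]
    rw [hset, hset, hset, hset]
    have hcell : cellB bc P 1 iw (-1) 1 0 0 = bc := by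
      unfold cellB
      rw [if_neg (by rintro ⟨h1, -⟩; norm_num at h1), if_pos (Or.inl rfl)]
    rw [hcell]


-- ===== preprocessing characterization, A side =====

theorem ppScan_foldl (grid : List (List Int)) :
    ppScan grid (PySem.List.len grid)
      (if (PySem.List.len grid) ≠ 0 then PySem.List.len (PySem.List.pyGetD grid 0 []) else 0)
    = (sCellList grid).foldl (fun d p => d.modify p.1 [] (fun cs => cs ++ [p.2]))
        PySem.Dict.empty := by
  unfold ppScan sCellList
  rw [List.foldl_flatMap]
  have hw : (if (PySem.List.len grid) ≠ 0
        then PySem.List.len (PySem.List.pyGetD grid 0 []) else 0)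
      = (((grid.headD []).length : Nat) : Int) := by
    rcases grid with _ | ⟨g0, gs⟩
    · simp [PySem.List.len]
    · simp [PySem.List.len_eq, PySem.List.pyGetD_zero_cons]
      omega
  rw [hw, PySem.List.len_eq]
  rw [PySem.List.pyRange_zero_nat (n := grid.length), List.foldl_map]
  apply PySem.List.foldl_congr_mem
  intro d i hi
  rw [List.foldl_flatMap, PySem.List.pyRange_zero_nat (n := (grid.headD []).length),
    List.foldl_map]
  apply PySem.List.foldl_congr_mem
  intro d' j hj
  simp only [PySem.List.pyGetD_natCast]
  by_cases hz : (grid.getD i []).getD j 0 = 0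
  · simp only [List.getD] at hz
    simp [hz]
  · simp only [List.getD] at hz
    simp [hz, List.foldl]

theorem cells_filter (grid : List (List Int)) (c : Int) :
    ((sCellList grid).filter (fun p => p.1 == c)).map (fun p => p.2) = sCellsOf grid c := by
  unfold sCellsOf
  induction sCellList grid with
  | nil => rfl
  | cons p ps ih =>
    by_cases hp : p.1 = c
    · simp [List.filter_cons, List.filterMap_cons, hp, ih]
    · simp [List.filter_cons, List.filterMap_cons, hp, ih]

theorem scan_getD (grid : List (List Int)) (c : Int) :
    ((sCellList grid).foldl (fun d p => d.modify p.1 [] (fun cs => cs ++ [p.2]))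
      PySem.Dict.empty).getD c [] = sCellsOf grid c := by
  rw [PySem.Dict.getD_foldl_modify_append]
  simp only [PySem.Dict.getD_empty, List.nil_append]
  exact cells_filter grid c

theorem scan_keys (grid : List (List Int)) :
    ((sCellList grid).foldl (fun d p => d.modify p.1 [] (fun cs => cs ++ [p.2]))
      PySem.Dict.empty).keys = sColours grid := by
  rw [PySem.Dict.keys_foldl_modify_key (sCellList grid) (fun p => p.1) []
    (fun _ p => fun cs => cs ++ [p.2]) PySem.Dict.empty]
  simp [PySem.Set.update_nil_left, sColours]

theorem scan_nodup (grid : List (List Int)) :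
    ((sCellList grid).foldl (fun d p => d.modify p.1 [] (fun cs => cs ++ [p.2]))
      PySem.Dict.empty).keys.Nodup := by
  apply PySem.Dict.nodup_keys_foldl_modify_key (sCellList grid) (fun p => p.1) []
    (fun _ p => fun cs => cs ++ [p.2]) PySem.Dict.empty
  simp

theorem scan_items (grid : List (List Int)) :
    ((sCellList grid).foldl (fun d p => d.modify p.1 [] (fun cs => cs ++ [p.2]))
      PySem.Dict.empty).items
    = (sColours grid).map (fun c => (c, sCellsOf grid c)) := by
  rw [PySem.Dict.items_eq_map_keys _ (scan_nodup grid) [], scan_keys]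
  apply List.map_congr_left
  intro c _
  rw [scan_getD]

theorem bbox_eq : ppBBox = sBBox := by
  funext cells
  rcases cells with _ | ⟨q, qs⟩
  · rfl
  · unfold ppBBox sBBox
    dsimp only
    rw [List.map_cons, List.map_cons, PySem.List.min?_id_cons, PySem.List.max?_id_cons,
      PySem.List.min?_id_cons, PySem.List.max?_id_cons]
    simp only [Option.getD_some]
    rw [List.foldl_map, List.foldl_map, List.foldl_map, List.foldl_map]

theorem isBorder_eq : ppIsBorder = sIsBorder := by
  funext cells
  unfold ppIsBorder sIsBorder
  rw [bbox_eq, PySem.List.len_eq]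

-- spec-side values of the quantities both preps compute
def sIHe (grid : List (List Int)) (c : Int) : Int :=
  (sBBox (sCellsOf grid c)).2.1 - (sBBox (sCellsOf grid c)).1 + 1
def sIWe (grid : List (List Int)) (c : Int) : Int :=
  (sBBox (sCellsOf grid c)).2.2.2 - (sBBox (sCellsOf grid c)).2.2.1 + 1
def sKe (grid : List (List Int)) (bc ic : Int) : Int :=
  if PySem.Int.floordiv (min ((sIHe grid bc) - 2) ((sIWe grid bc) - 2)) (sIHe grid ic) = 0
  then 1
  else PySem.Int.floordiv (min ((sIHe grid bc) - 2) ((sIWe grid bc) - 2)) (sIHe grid ic)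

-- A's pattern grid, written over the spec-side cells
def PA (grid : List (List Int)) (ic : Int) : List (List Int) :=
  (sCellsOf grid ic).foldl (fun P q =>
      PySem.List.pySetD P (q.1 - (sBBox (sCellsOf grid ic)).1)
        (PySem.List.pySetD (PySem.List.pyGetD P (q.1 - (sBBox (sCellsOf grid ic)).1) [])
          (q.2 - (sBBox (sCellsOf grid ic)).2.2.1) ic))
    ((PySem.List.pyRange 0 ((sBBox (sCellsOf grid ic)).2.1 - (sBBox (sCellsOf grid ic)).1 + 1) 1).map
      (fun _ => PySem.List.pyRepeat [0]
        ((sBBox (sCellsOf grid ic)).2.2.2 - (sBBox (sCellsOf grid ic)).2.2.1 + 1)))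

-- B's pattern grid, read off the grid's inner bounding box
def PB (grid : List (List Int)) (ic : Int) : List (List Int) :=
  (PySem.List.pyRange (sBBox (sCellsOf grid ic)).1 ((sBBox (sCellsOf grid ic)).2.1 + 1) 1).map
    (fun i => (PySem.List.pyRange (sBBox (sCellsOf grid ic)).2.2.1
        ((sBBox (sCellsOf grid ic)).2.2.2 + 1) 1).map
      (fun j => if PySem.List.pyGetD (PySem.List.pyGetD grid i []) j 0 == ic then ic else 0))

theorem sParams_none2 (grid : List (List Int)) (bc : Int)
    (hb : sBorder grid = some bc)
    (hi : (sColours grid).find? (fun c => c != bc) = none) :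
    sParams grid = none := by
  unfold sParams
  rw [hb]
  dsimp only
  rw [hi]

theorem prep_of_some (grid : List (List Int)) (bc ic : Int)
    (hb : sBorder grid = some bc)
    (hi : (sColours grid).find? (fun c => c != bc) = some ic) :
    prep grid = some (bc, PA grid ic, sIHe grid ic, sIWe grid ic, sKe grid bc ic,
      2 + sKe grid bc ic * sIHe grid ic) := by
  unfold prep
  dsimp only
  rw [ppScan_foldl, scan_items, List.find?_map]
  have hpred : ((fun p : Int × List (Int × Int) => ppIsBorder p.2) ∘
      (fun c => (c, sCellsOf grid c))) = fun c => sIsBorder (sCellsOf grid c) := by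
    funext c
    simp [Function.comp, isBorder_eq]
  rw [hpred]
  unfold sBorder at hb
  rw [hb]
  dsimp only [Option.map_some]
  rw [scan_keys, hi]
  dsimp only
  rw [scan_getD, bbox_eq]
  rfl

theorem sParams_of (grid : List (List Int)) (bc ic : Int)
    (hb : sBorder grid = some bc)
    (hi : (sColours grid).find? (fun c => c != bc) = some ic) :
    sParams grid = some (bc, sIHe grid ic, sIWe grid ic, sKe grid bc ic) := by
  unfold sParams
  rw [hb]
  dsimp only
  rw [hi]
  rfl

theorem sCellsOf_ne_nil (grid : List (List Int)) (c : Int) (hc : c ∈ sColours grid) :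
    sCellsOf grid c ≠ [] := by
  unfold sColours at hc
  rw [PySem.Set.mem_ofList, List.mem_map] at hc
  obtain ⟨p, hp, hpc⟩ := hc
  unfold sCellsOf
  apply List.ne_nil_of_mem (a := p.2)
  rw [List.mem_filterMap]
  exact ⟨p, hp, by simp [hpc]⟩

theorem sBBox_bounds (cells : List (Int × Int)) (hne : cells ≠ []) :
    (sBBox cells).1 ≤ (sBBox cells).2.1 ∧ (sBBox cells).2.2.1 ≤ (sBBox cells).2.2.2 := by
  rcases cells with _ | ⟨q, qs⟩
  · exact absurd rfl hne
  · unfold sBBox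
    dsimp only
    constructor
    · calc qs.foldl (fun a p => min a p.1) q.1
          = (qs.map (fun p => p.1)).foldl min q.1 := (by rw [List.foldl_map])
        _ ≤ q.1 := (PySem.List.foldl_min_le _ _).1
        _ ≤ (qs.map (fun p => p.1)).foldl max q.1 := (PySem.List.le_foldl_max _ _).1
        _ = qs.foldl (fun a p => max a p.1) q.1 := by rw [List.foldl_map]
    · calc qs.foldl (fun a p => min a p.2) q.2
          = (qs.map (fun p => p.2)).foldl min q.2 := (by rw [List.foldl_map])
        _ ≤ q.2 := (PySem.List.foldl_min_le _ _).1
        _ ≤ (qs.map (fun p => p.2)).foldl max q.2 := (PySem.List.le_foldl_max _ _).1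
        _ = qs.foldl (fun a p => max a p.2) q.2 := by rw [List.foldl_map]

-- ===== preprocessing characterization, B side =====

-- one stats step as a dict insert of a value computed from the old lookup
def statVal : Option (Int × Int × Int × Int × Int) → Int → Int → Int × Int × Int × Int × Int
  | some s, i, j => (s.1 + 1, min s.2.1 i, max s.2.2.1 i, min s.2.2.2.1 j, max s.2.2.2.2 j)
  | none, i, j => (1, i, i, j, j)

theorem statUpd_insert (d : PySem.Dict Int (Int × Int × Int × Int × Int)) (col i j : Int) :
    statUpd d col i j = d.insert col (statVal (d.get? col) i j) := by
  rcases h : d.get? col with _ | s <;> simp [statUpd, statVal, h]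

theorem statScan_foldl (grid : List (List Int)) :
    statScan grid (PySem.List.len grid)
      (if (PySem.List.len grid) ≠ 0 then PySem.List.len (PySem.List.pyGetD grid 0 []) else 0)
    = (sCellList grid).foldl (fun d p => statUpd d p.1 p.2.1 p.2.2) PySem.Dict.empty := by
  unfold statScan sCellList
  rw [List.foldl_flatMap]
  have hw : (if (PySem.List.len grid) ≠ 0
        then PySem.List.len (PySem.List.pyGetD grid 0 []) else 0)
      = (((grid.headD []).length : Nat) : Int) := by
    rcases grid with _ | ⟨g0, gs⟩
    · simp [PySem.List.len]
    · simp [PySem.List.len_eq, PySem.List.pyGetD_zero_cons]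
      omega
  rw [hw, PySem.List.len_eq]
  rw [PySem.List.pyRange_zero_nat (n := grid.length), List.foldl_map]
  apply PySem.List.foldl_congr_mem
  intro d i hi
  rw [List.foldl_flatMap, PySem.List.pyRange_zero_nat (n := (grid.headD []).length),
    List.foldl_map]
  apply PySem.List.foldl_congr_mem
  intro d' j hj
  simp only [PySem.List.pyGetD_natCast]
  by_cases hz : (grid.getD i []).getD j 0 = 0
  · simp only [List.getD] at hz
    simp [hz]
  · simp only [List.getD] at hz
    simp [hz, List.foldl]

theorem statGet (l : List (Int × Int × Int)) (d : PySem.Dict Int (Int × Int × Int × Int × Int))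
    (c : Int) :
    (l.foldl (fun d p => statUpd d p.1 p.2.1 p.2.2) d).get? c
      = ((l.filter (fun p => p.1 == c)).map (fun p => p.2)).foldl
          (fun o q => some (statVal o q.1 q.2)) (d.get? c) := by
  induction l generalizing d with
  | nil => rfl
  | cons p l ih =>
    rw [List.foldl_cons, ih, List.filter_cons]
    by_cases hpc : p.1 = c
    · rw [if_pos (by simp [hpc]), List.map_cons, List.foldl_cons, statUpd_insert,
        PySem.Dict.get?_insert, if_pos hpc.symm, hpc]
    · rw [if_neg (by simp [hpc]), statUpd_insert, PySem.Dict.get?_insert,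
        if_neg (fun h => hpc h.symm)]

-- the stats a colour accumulates = length and bounding box of its cells
def statOf (cells : List (Int × Int)) : Int × Int × Int × Int × Int :=
  ((cells.length : Int), (sBBox cells).1, (sBBox cells).2.1,
   (sBBox cells).2.2.1, (sBBox cells).2.2.2)

theorem fold_some (qs : List (Int × Int)) (s : Int × Int × Int × Int × Int) :
    qs.foldl (fun o q => some (statVal o q.1 q.2)) (some s)
      = some (qs.foldl (fun s q => statVal (some s) q.1 q.2) s) := by
  induction qs generalizing s with
  | nil => rfl
  | cons q qs ih => rw [List.foldl_cons, List.foldl_cons, ih]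

theorem gFold (qs : List (Int × Int)) (m a b cl dl : Int) :
    qs.foldl (fun s q => statVal (some s) q.1 q.2) (m, a, b, cl, dl)
      = (m + qs.length, qs.foldl (fun x q => min x q.1) a, qs.foldl (fun x q => max x q.1) b,
         qs.foldl (fun x q => min x q.2) cl, qs.foldl (fun x q => max x q.2) dl) := by
  induction qs generalizing m a b cl dl with
  | nil => simp
  | cons q qs ih =>
    simp only [List.foldl_cons]
    rw [show statVal (some (m, a, b, cl, dl)) q.1 q.2
        = (m + 1, min a q.1, max b q.1, min cl q.2, max dl q.2) from rfl, ih]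
    congr 1
    push_cast [List.length_cons]
    ring

theorem statFold (cells : List (Int × Int)) (hne : cells ≠ []) :
    cells.foldl (fun o q => some (statVal o q.1 q.2)) none = some (statOf cells) := by
  rcases cells with _ | ⟨q, qs⟩
  · exact absurd rfl hne
  · rw [List.foldl_cons]
    show qs.foldl (fun o q => some (statVal o q.1 q.2)) (some (1, q.1, q.1, q.2, q.2)) = _
    rw [fold_some, gFold]
    unfold statOf sBBox
    dsimp only
    congr 1
    simp
    omega

theorem stat_getD (grid : List (List Int)) (c : Int) (hc : c ∈ sColours grid) :
    ((sCellList grid).foldl (fun d p => statUpd d p.1 p.2.1 p.2.2)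
      PySem.Dict.empty).getD c (0, 0, 0, 0, 0) = statOf (sCellsOf grid c) := by
  rw [PySem.Dict.getD_eq_get?_getD, statGet, PySem.Dict.get?_empty, cells_filter,
    statFold _ (sCellsOf_ne_nil grid c hc)]
  rfl

theorem stat_keys (grid : List (List Int)) :
    ((sCellList grid).foldl (fun d p => statUpd d p.1 p.2.1 p.2.2)
      PySem.Dict.empty).keys = sColours grid := by
  rw [PySem.List.foldl_congr_mem (sCellList grid) _
    (fun d p => d.insert p.1 (statVal (d.get? p.1) p.2.1 p.2.2)) PySem.Dict.empty
    (fun d p _ => statUpd_insert d p.1 p.2.1 p.2.2)]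
  rw [PySem.Dict.keys_foldl_insert_key (sCellList grid) (fun p => p.1)
    (fun d p => statVal (d.get? p.1) p.2.1 p.2.2) PySem.Dict.empty]
  simp [PySem.Set.update_nil_left, sColours]

theorem stat_nodup (grid : List (List Int)) :
    ((sCellList grid).foldl (fun d p => statUpd d p.1 p.2.1 p.2.2)
      PySem.Dict.empty).keys.Nodup := by
  rw [PySem.List.foldl_congr_mem (sCellList grid) _
    (fun d p => d.insert p.1 (statVal (d.get? p.1) p.2.1 p.2.2)) PySem.Dict.empty
    (fun d p _ => statUpd_insert d p.1 p.2.1 p.2.2)]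
  apply PySem.Dict.nodup_keys_foldl_insert_key
  simp

theorem prepB_of_some (grid : List (List Int)) (bc ic : Int)
    (hb : sBorder grid = some bc)
    (hi : (sColours grid).find? (fun c => c != bc) = some ic) :
    prepB grid = some (bc, PB grid ic, sIHe grid ic, sIWe grid ic, sKe grid bc ic,
      2 + sKe grid bc ic * sIHe grid ic) := by
  have hbc : bc ∈ sColours grid := List.mem_of_find?_eq_some hb
  have hic : ic ∈ sColours grid := List.mem_of_find?_eq_some hi
  unfold prepB
  dsimp only
  rw [statScan_foldl]
  rw [PySem.Dict.items_eq_map_keys _ (stat_nodup grid) (0, 0, 0, 0, 0), stat_keys,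
    List.find?_map]
  rw [find?_congr_mem (sColours grid) _ (fun c => sIsBorder (sCellsOf grid c)) (by
    intro c hc
    show (fun p : Int × (Int × Int × Int × Int × Int) => p.2.1 ==
        2 * ((p.2.2.2.1 - p.2.2.1 + 1) + (p.2.2.2.2.2 - p.2.2.2.2.1 + 1)) - 4)
        ((fun c => (c, _)) c) = _
    dsimp only
    rw [stat_getD grid c hc]
    rfl)]
  unfold sBorder at hb
  rw [hb]
  dsimp only [Option.map_some]
  rw [stat_getD grid bc hbc, hi]
  dsimp only
  rw [stat_getD grid ic hic]
  unfold statOf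
  dsimp only
  unfold PB sIHe sIWe sKe
  have e1 : (sBBox (sCellsOf grid bc)).2.1 - (sBBox (sCellsOf grid bc)).1 - 1
      = ((sBBox (sCellsOf grid bc)).2.1 - (sBBox (sCellsOf grid bc)).1 + 1) - 2 := by ring
  have e2 : (sBBox (sCellsOf grid bc)).2.2.2 - (sBBox (sCellsOf grid bc)).2.2.1 - 1
      = ((sBBox (sCellsOf grid bc)).2.2.2 - (sBBox (sCellsOf grid bc)).2.2.1 + 1) - 2 := by ring
  rw [e1, e2]
  rfl


-- ===== the two pattern grids coincide =====

theorem le_foldl_min_pair (t : List (Int × Int)) (f : Int × Int → Int) (a m : Int)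
    (hm : m ≤ a) (h : ∀ y ∈ t, m ≤ f y) : m ≤ t.foldl (fun x q => min x (f q)) a := by
  induction t generalizing a with
  | nil => exact hm
  | cons y t ih =>
    exact ih _ (le_min hm (h y List.mem_cons_self)) (fun z hz => h z (List.mem_cons_of_mem _ hz))

theorem foldl_max_le_pair (t : List (Int × Int)) (f : Int × Int → Int) (a m : Int)
    (hm : a ≤ m) (h : ∀ y ∈ t, f y ≤ m) : t.foldl (fun x q => max x (f q)) a ≤ m := by
  induction t generalizing a with
  | nil => exact hm
  | cons y t ih =>
    exact ih _ (max_le hm (h y List.mem_cons_self)) (fun z hz => h z (List.mem_cons_of_mem _ hz))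

theorem sBBox_mem (cells : List (Int × Int)) : ∀ p ∈ cells,
    (sBBox cells).1 ≤ p.1 ∧ p.1 ≤ (sBBox cells).2.1 ∧
    (sBBox cells).2.2.1 ≤ p.2 ∧ p.2 ≤ (sBBox cells).2.2.2 := by
  rcases cells with _ | ⟨q, qs⟩
  · intro p hp; cases hp
  · intro p hp
    unfold sBBox
    dsimp only
    have e1 : qs.foldl (fun a p => min a p.1) q.1 = (qs.map (fun p => p.1)).foldl min q.1 := by
      rw [List.foldl_map]
    have e2 : qs.foldl (fun a p => max a p.1) q.1 = (qs.map (fun p => p.1)).foldl max q.1 := by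
      rw [List.foldl_map]
    have e3 : qs.foldl (fun a p => min a p.2) q.2 = (qs.map (fun p => p.2)).foldl min q.2 := by
      rw [List.foldl_map]
    have e4 : qs.foldl (fun a p => max a p.2) q.2 = (qs.map (fun p => p.2)).foldl max q.2 := by
      rw [List.foldl_map]
    rcases List.mem_cons.1 hp with hq | hq
    · subst hq
      rw [e1, e2, e3, e4]
      exact ⟨(PySem.List.foldl_min_le _ _).1, (PySem.List.le_foldl_max _ _).1,
        (PySem.List.foldl_min_le _ _).1, (PySem.List.le_foldl_max _ _).1⟩
    · rw [e1, e2, e3, e4]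
      exact ⟨(PySem.List.foldl_min_le _ _).2 p.1 (List.mem_map_of_mem hq),
        (PySem.List.le_foldl_max _ _).2 p.1 (List.mem_map_of_mem hq),
        (PySem.List.foldl_min_le _ _).2 p.2 (List.mem_map_of_mem hq),
        (PySem.List.le_foldl_max _ _).2 p.2 (List.mem_map_of_mem hq)⟩

theorem sBBox_lb (cells : List (Int × Int)) (hne : cells ≠ []) (m M m' M' : Int)
    (h : ∀ p ∈ cells, m ≤ p.1 ∧ p.1 ≤ M ∧ m' ≤ p.2 ∧ p.2 ≤ M') :
    m ≤ (sBBox cells).1 ∧ (sBBox cells).2.1 ≤ M ∧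
    m' ≤ (sBBox cells).2.2.1 ∧ (sBBox cells).2.2.2 ≤ M' := by
  rcases cells with _ | ⟨q, qs⟩
  · exact absurd rfl hne
  · obtain ⟨h1, h2, h3, h4⟩ := h q List.mem_cons_self
    unfold sBBox
    dsimp only
    exact ⟨le_foldl_min_pair qs (fun p => p.1) q.1 m h1
        (fun y hy => (h y (List.mem_cons_of_mem _ hy)).1),
      foldl_max_le_pair qs (fun p => p.1) q.1 M h2
        (fun y hy => (h y (List.mem_cons_of_mem _ hy)).2.1),
      le_foldl_min_pair qs (fun p => p.2) q.2 m' h3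
        (fun y hy => (h y (List.mem_cons_of_mem _ hy)).2.2.1),
      foldl_max_le_pair qs (fun p => p.2) q.2 M' h4
        (fun y hy => (h y (List.mem_cons_of_mem _ hy)).2.2.2)⟩

theorem mem_sCellsOf (grid : List (List Int)) (c : Int) (p : Int × Int) :
    p ∈ sCellsOf grid c ↔ ∃ iN : Nat, iN < grid.length ∧ ∃ jN : Nat,
      jN < (grid.headD []).length ∧ p = ((iN : Int), (jN : Int)) ∧
      (grid.getD iN []).getD jN 0 = c ∧ c ≠ 0 := by
  unfold sCellsOf sCellList
  simp only [List.mem_filterMap, List.mem_flatMap, List.mem_range]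
  constructor
  · rintro ⟨q, ⟨i, hi, j, hj, hq⟩, hqp⟩
    by_cases hz : (grid.getD i []).getD j 0 ≠ 0
    · rw [if_pos hz] at hq
      have hq' : q = ((grid.getD i []).getD j 0, ((i : Int), (j : Int))) :=
        List.mem_singleton.1 hq
      subst hq'
      dsimp only at hqp
      by_cases hvc : (grid.getD i []).getD j 0 = c
      · rw [if_pos hvc] at hqp
        have hp := Option.some.inj hqp
        exact ⟨i, hi, j, hj, hp.symm, hvc, fun h => hz (by rw [hvc, h])⟩
      · rw [if_neg hvc] at hqp
        cases hqp
    · rw [if_neg hz] at hq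
      cases hq
  · rintro ⟨iN, hiN, jN, hjN, hp, hval, hc0⟩
    refine ⟨(c, ((iN : Int), (jN : Int))), ⟨iN, hiN, jN, hjN, ?_⟩, by simp [hp]⟩
    rw [if_pos (show (grid.getD iN []).getD jN 0 ≠ 0 by rw [hval]; exact hc0), hval]
    exact List.mem_singleton.2 rfl

theorem sColours_nonzero (grid : List (List Int)) (c : Int) (hc : c ∈ sColours grid) :
    c ≠ 0 := by
  obtain ⟨p, hp⟩ := List.exists_mem_of_ne_nil _ (sCellsOf_ne_nil grid c hc)
  rcases (mem_sCellsOf grid c p).1 hp with ⟨_, _, _, _, _, _, h⟩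
  exact h

theorem PA_eq_PB (grid : List (List Int)) (ic : Int) (hic : ic ∈ sColours grid) :
    PA grid ic = PB grid ic := by
  have hne := sCellsOf_ne_nil grid ic hic
  have hic0 := sColours_nonzero grid ic hic
  have hmem := sBBox_mem (sCellsOf grid ic)
  have hrange : ∀ p ∈ sCellsOf grid ic, 0 ≤ p.1 ∧ p.1 < (grid.length : Int) ∧
      0 ≤ p.2 ∧ p.2 < ((grid.headD []).length : Int) := by
    intro p hp
    rcases (mem_sCellsOf grid ic p).1 hp with ⟨iN, hiN, jN, hjN, hp', -, -⟩
    subst hp'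
    refine ⟨by omega, by omega, by omega, by omega⟩
  have hlb := sBBox_lb (sCellsOf grid ic) hne 0 ((grid.length : Int) - 1) 0
    (((grid.headD []).length : Int) - 1) (by
      intro p hp
      have := hrange p hp
      exact ⟨this.1, by omega, this.2.2.1, by omega⟩)
  obtain ⟨hTB, hLR⟩ := sBBox_bounds (sCellsOf grid ic) hne
  obtain ⟨hT0, hBh, hL0, hRw⟩ := hlb
  have eih : (sBBox (sCellsOf grid ic)).2.1 - (sBBox (sCellsOf grid ic)).1 + 1
      = (((sBBox (sCellsOf grid ic)).2.1 - (sBBox (sCellsOf grid ic)).1 + 1).toNat : Int) := by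
    omega
  have eiw : (sBBox (sCellsOf grid ic)).2.2.2 - (sBBox (sCellsOf grid ic)).2.2.1 + 1
      = (((sBBox (sCellsOf grid ic)).2.2.2 - (sBBox (sCellsOf grid ic)).2.2.1 + 1).toNat : Int) := by
    omega
  set T := (sBBox (sCellsOf grid ic)).1 with hTdef
  set B := (sBBox (sCellsOf grid ic)).2.1 with hBdef
  set L := (sBBox (sCellsOf grid ic)).2.2.1 with hLdef
  set R := (sBBox (sCellsOf grid ic)).2.2.2 with hRdef
  set ihN := (B - T + 1).toNat with hihNdef
  set iwN := (R - L + 1).toNat with hiwNdef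
  set ws := (sCellsOf grid ic).map (fun q => ((q.1 - T).toNat, (q.2 - L).toNat, ic))
    with hwsdef
  set Z := List.replicate ihN (List.replicate iwN (0 : Int)) with hZdef
  have hPA : PA grid ic = applyW Z ws := by
    unfold PA
    rw [← hTdef, ← hBdef, ← hLdef, ← hRdef]
    have hinit : ((PySem.List.pyRange 0 (B - T + 1) 1).map
        (fun _ => PySem.List.pyRepeat [(0:Int)] (R - L + 1))) = Z := by
      rw [eiw, eih, PySem.List.pyRange_zero_nat, hZdef]
      simp [List.map_map, PySem.List.pyRepeat_singleton, Function.comp_def, List.map_const']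
    rw [hinit, hwsdef, applyW, List.foldl_map]
    apply PySem.List.foldl_congr_mem
    intro P q hq
    obtain ⟨hq1, -, hq3, -⟩ := hmem q hq
    have e1 : q.1 - T = (((q.1 - T).toNat : Nat) : Int) := by omega
    have e2 : q.2 - L = (((q.2 - L).toNat : Nat) : Int) := by omega
    show setI P (q.1 - T) (q.2 - L) ic = setN P (q.1 - T).toNat (q.2 - L).toNat ic
    conv_lhs => rw [e1, e2]
    exact setI_natCast P _ _ ic
  have hZrow : ∀ r : Nat, r < ihN → (Z.getD r []).length = iwN := by
    intro r hr
    simp [hZdef, List.getD, hr]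
  have hgPA : ∀ a b : Nat, a < ihN → b < iwN →
      gN (applyW Z ws) a b = (if (T + (a : Int), L + (b : Int)) ∈ sCellsOf grid ic
        then ic else 0) := by
    intro a b ha hb
    by_cases hm : (T + (a : Int), L + (b : Int)) ∈ sCellsOf grid ic
    · rw [if_pos hm]
      apply gN_applyW_mem
      · rw [hwsdef, List.mem_map]
        refine ⟨(T + (a : Int), L + (b : Int)), hm, ?_⟩
        simp only [Prod.mk.injEq]
        refine ⟨by omega, by omega, trivial⟩
      · intro w hw _ _
        rw [hwsdef, List.mem_map] at hw
        obtain ⟨q, -, hq⟩ := hw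
        rw [← hq]
      · simp [hZdef, ha]
      · rw [hZrow a ha]; exact hb
    · rw [if_neg hm, gN_applyW_not_mem]
      · simp [hZdef, gN, List.getD, ha, hb]
      · intro w hw hwc
        rw [hwsdef, List.mem_map] at hw
        obtain ⟨q, hqmem, hq⟩ := hw
        obtain ⟨hq1, -, hq3, -⟩ := hmem q hqmem
        rw [← hq] at hwc
        dsimp only at hwc
        apply hm
        have hqe : q = (T + (a : Int), L + (b : Int)) := by
          have h1 : q.1 = T + (a : Int) := by omega
          have h2 : q.2 = L + (b : Int) := by omega
          exact Prod.ext h1 h2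
        rw [← hqe]
        exact hqmem
  have hbridge : ∀ a b : Nat, a < ihN → b < iwN →
      ((T + (a : Int), L + (b : Int)) ∈ sCellsOf grid ic ↔
        PySem.List.pyGetD (PySem.List.pyGetD grid (T + (a : Int)) []) (L + (b : Int)) 0 = ic) := by
    intro a b ha hb
    constructor
    · intro hm
      rcases (mem_sCellsOf grid ic _).1 hm with ⟨iN, hiN, jN, hjN, hp', hval, -⟩
      have h1 : T + (a : Int) = (iN : Int) := congrArg Prod.fst hp'
      have h2 : L + (b : Int) = (jN : Int) := congrArg Prod.snd hp'
      rw [h1, h2]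
      simpa using hval
    · intro hv
      have h1 : T + (a : Int) = (((T + (a : Int)).toNat : Nat) : Int) := by omega
      have h2 : L + (b : Int) = (((L + (b : Int)).toNat : Nat) : Int) := by omega
      apply (mem_sCellsOf grid ic _).2
      refine ⟨(T + (a : Int)).toNat, by omega, (L + (b : Int)).toNat, by omega, ?_, ?_, hic0⟩
      · rw [Prod.mk.injEq]
        exact ⟨h1, h2⟩
      · rw [h1, h2] at hv
        rw [PySem.List.pyGetD_natCast, PySem.List.pyGetD_natCast] at hv
        exact hv
  have hPB : PB grid ic = (List.range ihN).map (fun (a : Nat) => (List.range iwN).map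
      (fun (b : Nat) =>
      if PySem.List.pyGetD (PySem.List.pyGetD grid (T + (a : Int)) []) (L + (b : Int)) 0 == ic
      then ic else 0)) := by
    unfold PB
    rw [← hTdef, ← hBdef, ← hLdef, ← hRdef]
    rw [PySem.List.pyRange_one T (B + 1), PySem.List.pyRange_one L (R + 1)]
    have e1 : (B + 1 - T).toNat = ihN := by omega
    have e2 : (R + 1 - L).toNat = iwN := by omega
    rw [e1, e2]
    simp only [List.map_map, Function.comp_def]
  rw [hPA, hPB]
  apply List.ext_getElem
  · rw [length_applyW]
    simp [hZdef]
  intro a h1 h2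
  rw [length_applyW] at h1
  have haN : a < ihN := by
    rw [hZdef] at h1
    simpa using h1
  rw [List.getElem_map, List.getElem_range]
  apply List.ext_getElem
  · rw [getElem_row _ _ (by rw [length_applyW]; exact h1), rowlen_applyW, hZrow a haN]
    simp
  intro b hb1 hb2
  have hbN : b < iwN := by
    rw [getElem_row _ _ (by rw [length_applyW]; exact h1), rowlen_applyW, hZrow a haN] at hb1
    exact hb1
  rw [getElem_gN _ a b (by rw [length_applyW]; exact h1)
    (by rw [getElem_row _ _ (by rw [length_applyW]; exact h1)] at hb1 ⊢; exact hb1)]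
  rw [hgPA a b haN hbN, List.getElem_map, List.getElem_range]
  by_cases hm : (T + (a : Int), L + (b : Int)) ∈ sCellsOf grid ic
  · rw [if_pos hm, if_pos (by rw [beq_iff_eq]; exact ((hbridge a b haN hbN).1 hm))]
  · rw [if_neg hm, if_neg (by
      rw [beq_iff_eq]
      intro hv
      exact hm ((hbridge a b haN hbN).2 hv))]

-- ===== assembling the claim =====

theorem main_eq (grid : List (List Int)) (hpre : Pre_transform grid) :
    transform grid = transform_alt grid := by
  obtain ⟨hrows, hsome, hkle⟩ := hpre
  rcases hb : sBorder grid with _ | bc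
  · exact absurd (by simp [sParams, hb]) hsome
  rcases hi : (sColours grid).find? (fun c => c != bc) with _ | ic
  · exact absurd (sParams_none2 grid bc hb hi) hsome
  have hP := sParams_of grid bc ic hb hi
  have hic : ic ∈ sColours grid := List.mem_of_find?_eq_some hi
  have hK : sK grid = sKe grid bc ic := by simp [sK, hP]
  have hIH : sIH grid = sIHe grid ic := by simp [sIH, hP]
  have hIW : sIW grid = sIWe grid ic := by simp [sIW, hP]
  rw [hK, hIW, hIH] at hkle
  have hibox := sBBox_bounds _ (sCellsOf_ne_nil grid ic hic)
  have hih1 : 1 ≤ sIHe grid ic := by unfold sIHe; omega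
  have hiw1 : 1 ≤ sIWe grid ic := by unfold sIWe; omega
  have hkne : sKe grid bc ic ≠ 0 := by
    unfold sKe
    split
    · exact one_ne_zero
    · rename_i h
      exact h
  unfold transform transform_alt
  rw [prep_of_some grid bc ic hb hi, prepB_of_some grid bc ic hb hi]
  dsimp only
  rw [PA_eq_PB grid ic hic]
  rcases (show 1 ≤ sKe grid bc ic ∨ sKe grid bc ic ≤ -1 by omega) with hk | hk
  · have hkle2 : sKe grid bc ic * (sIWe grid ic - sIHe grid ic) ≤ 1 := by
      rcases hkle with h | h
      · omega
      · exact h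
    have eih : sIHe grid ic = (((sIHe grid ic).toNat : Nat) : Int) := by omega
    have eiw : sIWe grid ic = (((sIWe grid ic).toNat : Nat) : Int) := by omega
    have ek : sKe grid bc ic = (((sKe grid bc ic).toNat : Nat) : Int) := by omega
    have en : (2 : Int) + sKe grid bc ic * sIHe grid ic
        = (((2 + (sKe grid bc ic).toNat * (sIHe grid ic).toNat : Nat)) : Int) := by
      conv_lhs => rw [ek, eih]
      push_cast
      ring
    have h1 : sKe grid bc ic * sIWe grid ic ≤ sKe grid bc ic * sIHe grid ic + 1 := by
      have hms := mul_sub (sKe grid bc ic) (sIWe grid ic) (sIHe grid ic)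
      omega
    have hle' : (sKe grid bc ic).toNat * (sIWe grid ic).toNat
        ≤ (sKe grid bc ic).toNat * (sIHe grid ic).toNat + 1 := by
      rw [eih, eiw, ek] at h1
      exact_mod_cast h1
    rw [en, eih, eiw, ek]
    exact tail_eq bc (PB grid ic) _ _ _ (by omega) (by omega) hle'
  · exact tail_eq_deg bc (PB grid ic) _ _ _ hk hih1

-- ===== VERDICT (by name: the statement is the Claim_ definition above) =====
theorem transform_spec : Claim_equal_transform := by
  intro grid _ hpre
  exact main_eq grid hpre
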